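-- pv_equiv track=rewrite | github.com/yangheng95/OmniGenBench | examples/rna_secondary_structure_prediction/Secondary_Structure_Prediction.py | find_invalid_positions
-- ===== SOURCE A (Python) =====
-- def find_invalid_positions(struct: str) -> list:
--     stack, invalid = [], []
--     for i, c in enumerate(struct):
--         if c == '(': stack.append(i)
--         elif c == ')':
--             if stack:
--                 stack.pop()
--             else:
--                 invalid.append(i)
--     invalid.extend(stack)
--     return invalid
-- ===== SOURCE B (Python) =====
-- def find_invalid_positions(struct: str) -> list:
--     # forward counting pass: unmatched ')' positions in increasing order
--     unmatched_close = []
--     balance = 0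
--     for i, c in enumerate(struct):
--         if c == '(':
--             balance += 1
--         elif c == ')':
--             if balance == 0:
--                 unmatched_close.append(i)
--             else:
--                 balance -= 1
--     # backward counting pass: unmatched '(' positions (collected right-to-left)
--     unmatched_open = []
--     cnt = 0
--     for i, c in reversed(list(enumerate(struct))):
--         if c == ')':
--             cnt += 1
--         elif c == '(':
--             if cnt == 0:
--                 unmatched_open.append(i)
--             else:
--                 cnt -= 1
--     return unmatched_close + unmatched_open[::-1]
-- ===== Notes on version B (the rewrite author's own statement) =====
-- stated objective: alternative
-- what changed: Replaced the single stack-based pass with two stackless counting passes: a forward balance-counter pass collects unmatched ')' indices, and a backward counter pass (reversed at the end) collects unmatched '(' indices.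
import Mathlib
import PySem

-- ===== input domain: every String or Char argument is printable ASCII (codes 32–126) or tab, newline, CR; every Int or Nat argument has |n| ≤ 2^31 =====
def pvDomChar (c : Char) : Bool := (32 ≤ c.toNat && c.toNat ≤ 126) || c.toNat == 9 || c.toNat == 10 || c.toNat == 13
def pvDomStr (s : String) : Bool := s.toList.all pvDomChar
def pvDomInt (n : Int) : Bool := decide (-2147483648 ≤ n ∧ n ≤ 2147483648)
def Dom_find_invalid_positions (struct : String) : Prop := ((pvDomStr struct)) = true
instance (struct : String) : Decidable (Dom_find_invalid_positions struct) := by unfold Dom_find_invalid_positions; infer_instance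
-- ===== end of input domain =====

-- B replaces A's stack pass with two stackless counting passes (forward for unmatched ')',
-- backward for unmatched '('); same O(n) cost, alternative decomposition; return value proved equal.

-- ===== PORT A =====
-- one loop step of A: state (stack, invalid)
def aStep (p : List Int × List Int) (ic : Int × Char) : List Int × List Int :=
  if ic.2 = '(' then (p.1 ++ [ic.1], p.2)
  else if ic.2 = ')' then
    (if p.1 = [] then (p.1, p.2 ++ [ic.1]) else (p.1.dropLast, p.2))
  else p

def find_invalid_positions (struct : String) : List Int :=
  let r := (PySem.List.enumerate struct.toList).foldl aStep ([], [])
  r.2 ++ r.1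

-- ===== PORT B =====
-- forward pass step: state (balance, unmatched_close)
def fStep (p : Int × List Int) (ic : Int × Char) : Int × List Int :=
  if ic.2 = '(' then (p.1 + 1, p.2)
  else if ic.2 = ')' then
    (if p.1 = 0 then (p.1, p.2 ++ [ic.1]) else (p.1 - 1, p.2))
  else p

-- backward pass step: state (cnt, unmatched_open collected right-to-left)
def bStep (p : Int × List Int) (ic : Int × Char) : Int × List Int :=
  if ic.2 = ')' then (p.1 + 1, p.2)
  else if ic.2 = '(' then
    (if p.1 = 0 then (p.1, p.2 ++ [ic.1]) else (p.1 - 1, p.2))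
  else p

def find_invalid_positions_alt (struct : String) : List Int :=
  let e := PySem.List.enumerate struct.toList
  let f := e.foldl fStep (0, [])
  let b := e.reverse.foldl bStep (0, [])
  f.2 ++ b.2.reverse

-- ===== PRECONDITION & SPEC =====
def Spec_find_invalid_positions (struct : String) (out : List Int) : Prop := out = find_invalid_positions_alt struct
instance (struct : String) (out : List Int) : Decidable (Spec_find_invalid_positions struct out) := by unfold Spec_find_invalid_positions; infer_instance

-- ===== CLAIM (what is proved, stated in full; the proofs are below) =====
def Claim_equal_find_invalid_positions : Prop := ∀ (struct : String), Dom_find_invalid_positions struct → Spec_find_invalid_positions struct (find_invalid_positions struct)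

-- ===== LEMMAS AND PROOFS =====

-- mathematical form of the backward pass, computed right-to-left over the list:
-- (number of ')' not matched within t, unmatched '(' indices of t in right-to-left order)
def hb : List (Int × Char) → Nat × List Int
  | [] => (0, [])
  | (i, c) :: t =>
    let q := hb t
    if c = ')' then (q.1 + 1, q.2)
    else if c = '(' then (if q.1 = 0 then (0, q.2 ++ [i]) else (q.1 - 1, q.2))
    else q

-- the backward foldl of port B computes hb
theorem foldl_bStep_eq_hb : ∀ (l : List (Int × Char)) (acc : List Int),
    l.reverse.foldl bStep (0, acc) = (((hb l).1 : Int), acc ++ (hb l).2) := by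
  intro l
  induction l with
  | nil => intro acc; simp [hb]
  | cons x t ih =>
    intro acc
    obtain ⟨i, c⟩ := x
    rw [List.reverse_cons, List.foldl_append, ih]
    simp only [List.foldl_cons, List.foldl_nil]
    by_cases h1 : c = ')'
    · subst h1; simp [hb, bStep]
    · by_cases h2 : c = '('
      · subst h2
        by_cases h0 : (hb t).1 = 0
        · simp [hb, bStep, h0]
        · have hc : (((hb t).1 - 1 : Nat) : Int) = ((hb t).1 : Int) - 1 := by omega
          simp [hb, bStep, h0, hc]
      · simp [hb, bStep, h1, h2]

-- A's stack after a fold = prefix of the initial stack surviving hb's pops, then unmatched '('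
theorem foldl_aStep_stack : ∀ (t : List (Int × Char)) (s inv : List Int),
    (t.foldl aStep (s, inv)).1 = s.take (s.length - (hb t).1) ++ (hb t).2.reverse := by
  intro t
  induction t with
  | nil => intro s inv; simp [hb]
  | cons x t ih =>
    intro s inv
    obtain ⟨i, c⟩ := x
    rw [List.foldl_cons]
    by_cases h2 : c = '('
    · have ha : aStep (s, inv) (i, c) = (s ++ [i], inv) := by simp [aStep, h2]
      rw [ha, ih]
      simp only [hb, h2]
      by_cases h0 : (hb t).1 = 0
      · simp [h0, List.take_of_length_le]
      · have hk : (hb t).1 ≥ 1 := by omega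
        have hle : s.length + 1 - (hb t).1 ≤ s.length := by omega
        rw [List.take_append_of_le_length (by simpa using hle)]
        have : s.length + 1 - (hb t).1 = s.length - ((hb t).1 - 1) := by omega
        simp [h0, this]
    · by_cases h1 : c = ')'
      · subst h1
        by_cases hs : s = []
        · have ha : aStep (s, inv) (i, ')') = ([], inv ++ [i]) := by simp [aStep, hs]
          rw [ha, ih]
          simp [hb, hs]
        · have ha : aStep (s, inv) (i, ')') = (s.dropLast, inv) := by simp [aStep, hs]
          rw [ha, ih]
          have hlen : s.length ≠ 0 := by simpa [List.length_eq_zero_iff] using hs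
          simp only [hb, reduceIte, List.length_dropLast]
          rw [List.dropLast_eq_take, List.take_take]
          congr 2
          omega
      · have ha : aStep (s, inv) (i, c) = (s, inv) := by simp [aStep, h1, h2]
        rw [ha, ih]
        simp [hb, h1, h2]

-- A's invalid list = B's forward-pass list, when the balance equals the stack length
theorem foldl_fStep_inv : ∀ (t : List (Int × Char)) (s inv : List Int),
    (t.foldl fStep ((s.length : Int), inv)).2 = (t.foldl aStep (s, inv)).2 := by
  intro t
  induction t with
  | nil => intro s inv; rfl
  | cons x t ih =>
    intro s inv
    obtain ⟨i, c⟩ := x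
    rw [List.foldl_cons, List.foldl_cons]
    by_cases h2 : c = '('
    · have hf : fStep ((s.length : Int), inv) (i, c) = (((s ++ [i]).length : Int), inv) := by
        simp [fStep, h2]
      have ha : aStep (s, inv) (i, c) = (s ++ [i], inv) := by simp [aStep, h2]
      rw [hf, ha, ih]
    · by_cases h1 : c = ')'
      · subst h1
        by_cases hs : s = []
        · have hf : fStep ((s.length : Int), inv) (i, ')') = ((([] : List Int).length : Int), inv ++ [i]) := by
            simp [fStep, hs]
          have ha : aStep (s, inv) (i, ')') = ([], inv ++ [i]) := by simp [aStep, hs]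
          rw [hf, ha, ih]
        · have hpos : s.length ≠ 0 := by simpa [List.length_eq_zero_iff] using hs
          have h0 : ((s.length : Int)) ≠ 0 := by exact_mod_cast hpos
          have hc : ((s.length - 1 : Nat) : Int) = (s.length : Int) - 1 := by omega
          have hf : fStep ((s.length : Int), inv) (i, ')') = ((s.dropLast.length : Int), inv) := by
            simp [fStep, hs, List.length_dropLast, hc]
          have ha : aStep (s, inv) (i, ')') = (s.dropLast, inv) := by simp [aStep, hs]
          rw [hf, ha, ih]
      · have hf : fStep ((s.length : Int), inv) (i, c) = ((s.length : Int), inv) := by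
          simp [fStep, h1, h2]
        have ha : aStep (s, inv) (i, c) = (s, inv) := by simp [aStep, h1, h2]
        rw [hf, ha, ih]

-- ===== VERDICT (by name: the statement is the Claim_ definition above) =====
theorem find_invalid_positions_spec : Claim_equal_find_invalid_positions := by
  intro struct _
  unfold Spec_find_invalid_positions find_invalid_positions find_invalid_positions_alt
  set e := PySem.List.enumerate struct.toList with he
  have hstack := foldl_aStep_stack e [] []
  have hinv := foldl_fStep_inv e [] []
  have hback := foldl_bStep_eq_hb e []
  simp only [List.length_nil, Nat.cast_zero] at hinv
  simp only [List.take_nil, List.nil_append] at hstack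
  simp only [hback, List.nil_append]
  rw [← hinv, hstack]
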